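-- pv_equiv track=rewrite | github.com/Evoluke/fluxo_mesa | python/src/bpmn_to_planilha.py | classificar_por_coluna
-- ===== SOURCE A (Python) =====
-- from typing import Dict, Iterable, List, Optional, Sequence, Tuple
--
-- def classificar_por_coluna(task_ids: Iterable[str]) -> Dict[str, bool]:
--     papeis = {
--         "Assistente Sede": False,
--         "Analista I Sede": False,
--         "Outros usuarios": False,
--     }
--     for task_id in task_ids:
--         if task_id == "usertask7":
--             papeis["Assistente Sede"] = True
--         if task_id in {"usertask1", "usertask8"}:
--             papeis["Analista I Sede"] = True
--         if task_id in {"usertask2", "usertask3", "usertask4", "usertask5"}: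
--             papeis["Outros usuarios"] = True
--     return papeis
-- ===== SOURCE B (Python) =====
-- def classificar_por_coluna(task_ids):
--     ids = set(task_ids)
--     return {
--         "Assistente Sede": "usertask7" in ids,
--         "Analista I Sede": bool(ids & {"usertask1", "usertask8"}),
--         "Outros usuarios": bool(ids & {"usertask2", "usertask3", "usertask4", "usertask5"}),
--     }
-- ===== Notes on version B (the rewrite author's own statement) =====
-- stated objective: simpler
-- what changed: Replaces the scanning loop with per-element dict updates by building set(task_ids) once and computing each of the three flags independently via membership / set-intersection queries against it.
import Mathlib
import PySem

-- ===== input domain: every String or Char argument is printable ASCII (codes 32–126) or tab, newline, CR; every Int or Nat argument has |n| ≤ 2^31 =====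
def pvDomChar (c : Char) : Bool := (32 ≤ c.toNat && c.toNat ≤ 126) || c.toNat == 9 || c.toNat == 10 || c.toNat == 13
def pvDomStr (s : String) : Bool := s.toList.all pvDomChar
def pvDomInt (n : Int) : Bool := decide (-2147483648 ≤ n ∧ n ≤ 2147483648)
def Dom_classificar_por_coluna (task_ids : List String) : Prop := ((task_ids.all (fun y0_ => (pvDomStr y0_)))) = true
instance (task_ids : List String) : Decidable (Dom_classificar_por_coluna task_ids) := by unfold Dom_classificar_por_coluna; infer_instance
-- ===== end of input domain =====

-- B builds set(task_ids) once and computes the three flags by independent membership /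
-- intersection queries, instead of A's scanning loop with per-element dict updates (objective: simpler).

-- ===== PORT A =====
def classificar_por_coluna (task_ids : List String) : List (String × Bool) :=
  let papeis : PySem.Dict String Bool :=
    ((PySem.Dict.empty.insert "Assistente Sede" false).insert "Analista I Sede" false).insert
      "Outros usuarios" false
  let papeis := task_ids.foldl (fun d task_id =>
    let d := if task_id == "usertask7" then d.insert "Assistente Sede" true else d
    let d := if (PySem.Set.ofList ["usertask1", "usertask8"]).contains task_id then
               d.insert "Analista I Sede" true else d
    let d := if (PySem.Set.ofList ["usertask2", "usertask3", "usertask4", "usertask5"]).contains task_id then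
               d.insert "Outros usuarios" true else d
    d) papeis
  papeis.items

-- ===== PORT B =====
def classificar_por_coluna_alt (task_ids : List String) : List (String × Bool) :=
  let ids : PySem.Set String := PySem.Set.ofList task_ids
  [("Assistente Sede", ids.contains "usertask7"),
   ("Analista I Sede", !(PySem.Set.inter ids (PySem.Set.ofList ["usertask1", "usertask8"])).isEmpty),
   ("Outros usuarios", !(PySem.Set.inter ids (PySem.Set.ofList ["usertask2", "usertask3", "usertask4", "usertask5"])).isEmpty)]

-- ===== PRECONDITION & SPEC =====
def Spec_classificar_por_coluna (task_ids : List String) (out : List (String × Bool)) : Prop := out = classificar_por_coluna_alt task_ids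
instance (task_ids : List String) (out : List (String × Bool)) : Decidable (Spec_classificar_por_coluna task_ids out) := by unfold Spec_classificar_por_coluna; infer_instance

-- ===== CLAIM (what is proved, stated in full; the proofs are below) =====
def Claim_equal_classificar_por_coluna : Prop := ∀ (task_ids : List String), Dom_classificar_por_coluna task_ids → Spec_classificar_por_coluna task_ids (classificar_por_coluna task_ids)

-- ===== LEMMAS AND PROOFS =====

-- the three-key dict with given flag values
def pvDict3 (a b c : Bool) : PySem.Dict String Bool :=
  PySem.Dict.mk [("Assistente Sede", a), ("Analista I Sede", b), ("Outros usuarios", c)]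

-- one step of A's loop on pvDict3
lemma pvStep_dict3 (a b c : Bool) (x : String) :
    (let d := if x == "usertask7" then (pvDict3 a b c).insert "Assistente Sede" true else pvDict3 a b c
     let d := if (PySem.Set.ofList ["usertask1", "usertask8"]).contains x then
                d.insert "Analista I Sede" true else d
     let d := if (PySem.Set.ofList ["usertask2", "usertask3", "usertask4", "usertask5"]).contains x then
                d.insert "Outros usuarios" true else d
     d)
    = pvDict3 (a || (x == "usertask7"))
              (b || (PySem.Set.ofList ["usertask1", "usertask8"]).contains x)
              (c || (PySem.Set.ofList ["usertask2", "usertask3", "usertask4", "usertask5"]).contains x) := by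
  by_cases h1 : x == "usertask7" <;>
  by_cases h2 : (PySem.Set.ofList ["usertask1", "usertask8"]).contains x <;>
  by_cases h3 : (PySem.Set.ofList ["usertask2", "usertask3", "usertask4", "usertask5"]).contains x <;>
  simp_all [pvDict3, PySem.Dict.insert, PySem.Dict.contains]

-- A's whole loop on pvDict3
lemma pvFold_dict3 (xs : List String) (a b c : Bool) :
    xs.foldl (fun d task_id =>
      let d := if task_id == "usertask7" then d.insert "Assistente Sede" true else d
      let d := if (PySem.Set.ofList ["usertask1", "usertask8"]).contains task_id then
                 d.insert "Analista I Sede" true else d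
      let d := if (PySem.Set.ofList ["usertask2", "usertask3", "usertask4", "usertask5"]).contains task_id then
                 d.insert "Outros usuarios" true else d
      d) (pvDict3 a b c)
    = pvDict3 (a || xs.any (fun x => x == "usertask7"))
              (b || xs.any (fun x => (PySem.Set.ofList ["usertask1", "usertask8"]).contains x))
              (c || xs.any (fun x => (PySem.Set.ofList ["usertask2", "usertask3", "usertask4", "usertask5"]).contains x)) := by
  induction xs generalizing a b c with
  | nil => simp
  | cons x xs ih =>
      rw [List.foldl_cons, pvStep_dict3, ih]
      simp [Bool.or_assoc]

lemma pvAny_eq_contains_ofList (xs : List String) :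
    xs.any (fun x => x == "usertask7") = (PySem.Set.ofList xs).contains "usertask7" := by
  rw [Bool.eq_iff_iff]
  simp only [List.any_eq_true, beq_iff_eq, PySem.Set.contains_iff, PySem.Set.mem_ofList]
  exact ⟨fun ⟨x, hx, e⟩ => e ▸ hx, fun h => ⟨_, h, rfl⟩⟩

lemma pvAny_mem_eq_not_isEmpty_inter (xs : List String) (t : List String) :
    xs.any (fun x => (PySem.Set.ofList t).contains x)
      = !(PySem.Set.inter (PySem.Set.ofList xs) (PySem.Set.ofList t)).isEmpty := by
  rw [Bool.eq_iff_iff]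
  simp only [List.any_eq_true, Bool.not_eq_true', List.isEmpty_eq_false_iff_exists_mem,
    PySem.Set.contains_iff]
  constructor
  · rintro ⟨x, hx, hxt⟩
    exact ⟨x, (PySem.Set.mem_inter _ _ _).2 ⟨(PySem.Set.mem_ofList _ _).2 hx, hxt⟩⟩
  · rintro ⟨x, hx⟩
    obtain ⟨hh1, hh2⟩ := (PySem.Set.mem_inter _ _ _).1 hx
    exact ⟨x, (PySem.Set.mem_ofList _ _).1 hh1, hh2⟩

-- ===== VERDICT (by name: the statement is the Claim_ definition above) =====
theorem classificar_por_coluna_spec : Claim_equal_classificar_por_coluna := by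
  intro task_ids _
  unfold Spec_classificar_por_coluna
  show (task_ids.foldl (fun d task_id =>
      let d := if task_id == "usertask7" then d.insert "Assistente Sede" true else d
      let d := if (PySem.Set.ofList ["usertask1", "usertask8"]).contains task_id then
                 d.insert "Analista I Sede" true else d
      let d := if (PySem.Set.ofList ["usertask2", "usertask3", "usertask4", "usertask5"]).contains task_id then
                 d.insert "Outros usuarios" true else d
      d) (pvDict3 false false false)).items = classificar_por_coluna_alt task_ids
  rw [pvFold_dict3]
  show _ = [("Assistente Sede", (PySem.Set.ofList task_ids).contains "usertask7"),
   ("Analista I Sede", !(PySem.Set.inter (PySem.Set.ofList task_ids) (PySem.Set.ofList ["usertask1", "usertask8"])).isEmpty),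
   ("Outros usuarios", !(PySem.Set.inter (PySem.Set.ofList task_ids) (PySem.Set.ofList ["usertask2", "usertask3", "usertask4", "usertask5"])).isEmpty)]
  simp only [Bool.false_or]
  rw [pvAny_eq_contains_ofList, pvAny_mem_eq_not_isEmpty_inter, pvAny_mem_eq_not_isEmpty_inter]
  rfl
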